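-- pv_equiv track=rewrite | github.com/daltonhahn/d-and-dbs | webapp/api/api.py | replace_chars
-- ===== SOURCE A (Python) =====
-- def replace_chars(result):
--     new_result = []
--     bad_chars = ["\n", "\r", "'", '"']
--     for w in result:
--         for i in bad_chars:
--             w = str(w).replace(i,'')
--         new_result.append(w)
--     return tuple(new_result)
-- ===== SOURCE B (Python) =====
-- def replace_chars(result):
--     bad = {"\n", "\r", "'", '"'}
--     return tuple("".join(c for c in str(w) if c not in bad) for w in result)
-- ===== Notes on version B (the rewrite author's own statement) =====
-- stated objective: idiomatic
-- what changed: Replaces the accumulator loop with four sequential full-string .replace passes per element by a single character-level filter pass per element against a set of bad characters, built as a generator expression.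
import Mathlib
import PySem

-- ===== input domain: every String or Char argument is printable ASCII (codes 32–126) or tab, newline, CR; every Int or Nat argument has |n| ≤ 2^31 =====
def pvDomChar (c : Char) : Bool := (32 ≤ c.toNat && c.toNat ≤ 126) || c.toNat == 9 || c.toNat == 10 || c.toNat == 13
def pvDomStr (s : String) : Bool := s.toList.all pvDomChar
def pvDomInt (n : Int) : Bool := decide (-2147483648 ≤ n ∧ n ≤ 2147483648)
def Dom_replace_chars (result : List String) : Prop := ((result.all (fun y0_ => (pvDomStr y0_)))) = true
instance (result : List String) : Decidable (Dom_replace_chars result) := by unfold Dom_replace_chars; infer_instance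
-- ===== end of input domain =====

-- B replaces A's four sequential single-char .replace passes per element by one character-filter pass against a set of bad characters (idiomatic, alternative decomposition).


-- ===== PORT A =====
-- for w in result: for i in bad_chars: w = w.replace(i, ''); new_result.append(w)
def replace_chars (result : List String) : List String :=
  let bad_chars : List String := ["\n", "\r", "'", "\""]
  result.foldl (fun new_result w =>
    new_result ++ [bad_chars.foldl (fun w i => PySem.Str.replace w i "") w]) []

-- ===== PORT B =====
-- tuple("".join(c for c in str(w) if c not in bad) for w in result); "".join of kept chars = String.ofList of the filtered char list
def replace_chars_alt (result : List String) : List String :=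
  result.map (fun w =>
    String.ofList (w.toList.filter (fun c => !(c == '\n' || c == '\r' || c == '\'' || c == '"'))))

-- ===== PRECONDITION & SPEC =====
def Spec_replace_chars (result : List String) (out : List String) : Prop := out = replace_chars_alt result
instance (result : List String) (out : List String) : Decidable (Spec_replace_chars result out) := by unfold Spec_replace_chars; infer_instance

-- ===== CLAIM (what is proved, stated in full; the proofs are below) =====
def Claim_equal_replace_chars : Prop := ∀ (result : List String), Dom_replace_chars result → Spec_replace_chars result (replace_chars result)

-- ===== LEMMAS AND PROOFS =====

-- replace.go with old a single char and new = "" just filters that char out (given enough fuel)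
theorem go_single (b : Char) (fuel : Nat) (l acc : List Char) (h : l.length ≤ fuel) :
    PySem.Chars.replace.go [b] [] fuel l acc = acc.reverse ++ l.filter (fun c => c != b) := by
  induction fuel generalizing l acc with
  | zero =>
    have : l = [] := List.length_eq_zero_iff.mp (Nat.le_zero.mp h)
    subst this; simp [PySem.Chars.replace.go]
  | succ n ih =>
    cases l with
    | nil => simp [PySem.Chars.replace.go]
    | cons c t =>
      simp only [PySem.Chars.replace.go, List.isPrefixOf]
      by_cases hc : c = b
      · subst hc
        simp only [BEq.rfl, Bool.true_and, if_pos, List.length_cons, List.drop_succ_cons,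
          List.length_nil, List.drop_zero, List.reverse_nil, List.nil_append]
        rw [ih t acc (by simpa using h)]
        simp
      · have : (b == c) = false := by simpa using fun h' => hc h'.symm
        simp only [this, Bool.false_and, if_neg Bool.false_ne_true]
        rw [ih t (c :: acc) (by simpa using h)]
        simp [hc]

theorem replace_single (b : Char) (l : List Char) :
    PySem.Chars.replace l [b] [] = l.filter (fun c => c != b) := by
  rw [PySem.Chars.replace]
  simp only [List.isEmpty_cons, if_neg Bool.false_ne_true]
  simpa using go_single b l.length l [] le_rfl

theorem foldl_snoc (f : String → String) (l : List String) (acc : List String) :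
    l.foldl (fun a w => a ++ [f w]) acc = acc ++ l.map f := by
  induction l generalizing acc with
  | nil => simp
  | cons x t ih => simp [List.foldl_cons, ih]

theorem elem_eq (w : String) :
    (["\n", "\r", "'", "\""] : List String).foldl (fun w i => PySem.Str.replace w i "") w
      = String.ofList (w.toList.filter (fun c => !(c == '\n' || c == '\r' || c == '\'' || c == '"'))) := by
  apply String.toList_inj.mp
  simp only [List.foldl_cons, List.foldl_nil, PySem.Str.toList_replace]
  simp only [String.toList_ofList,
    show "\n".toList = ['\n'] from by simp, show "\r".toList = ['\r'] from by simp,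
    show "'".toList = ['\''] from by simp, show "\"".toList = ['"'] from by simp,
    show ("" : String).toList = [] from by simp,
    replace_single, List.filter_filter]
  apply List.filter_congr
  intro c _
  simp only [bne, Bool.not_or]
  simp [Bool.and_comm, Bool.and_left_comm, Bool.and_assoc]

-- ===== VERDICT (by name: the statement is the Claim_ definition above) =====
theorem replace_chars_spec : Claim_equal_replace_chars := by
  intro result _
  unfold Spec_replace_chars replace_chars replace_chars_alt
  rw [foldl_snoc, List.nil_append]
  exact List.map_congr_left (fun w _ => elem_eq w)
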